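-- pv_equiv track=rewrite | github.com/Onadelyer/PZPK_Labas | Laba2-Python/Task7.py | get_last_even_elements
-- ===== SOURCE A (Python) =====
-- def get_last_even_elements(matrix):
--     result = []
--
--     for row in matrix:
--         last_even_element = None
--
--         for element in row:
--             if element % 2 == 0:
--                 last_even_element = element
--
--         if last_even_element is not None:
--             result.append(last_even_element)
--
--     return result
-- ===== SOURCE B (Python) =====
-- def get_last_even_elements(matrix):
--     result = []
--     for row in matrix:
--         for element in reversed(row):
--             if element % 2 == 0:
--                 result.append(element)
--                 break
--     return result
-- ===== Notes on version B (the rewrite author's own statement) =====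
-- stated objective: alternative
-- what changed: B scans each row backwards and stops at the first even element (reversed + break), instead of A's forward full scan that keeps overwriting a last-even accumulator.
import Mathlib
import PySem

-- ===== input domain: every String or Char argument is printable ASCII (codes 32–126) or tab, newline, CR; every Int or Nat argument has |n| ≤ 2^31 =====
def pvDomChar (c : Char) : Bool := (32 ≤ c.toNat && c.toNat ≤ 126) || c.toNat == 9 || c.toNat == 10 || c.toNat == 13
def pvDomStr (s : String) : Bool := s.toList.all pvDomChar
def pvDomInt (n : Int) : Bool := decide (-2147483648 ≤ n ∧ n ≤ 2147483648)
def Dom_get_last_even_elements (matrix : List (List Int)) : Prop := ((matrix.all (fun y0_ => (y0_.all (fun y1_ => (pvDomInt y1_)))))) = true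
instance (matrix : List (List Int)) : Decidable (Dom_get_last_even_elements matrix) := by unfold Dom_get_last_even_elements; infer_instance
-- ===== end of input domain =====

-- B scans each row backwards and stops at the first even element, instead of A's
-- forward full scan with a last-even accumulator (alternative decomposition, same cost class).

-- ===== PORT A =====
def get_last_even_elements (matrix : List (List Int)) : List Int :=
  matrix.foldl (fun result row =>
    let last_even_element : Option Int :=
      row.foldl (fun acc element =>
        if PySem.Int.mod element 2 == 0 then some element else acc) none
    match last_even_element with
    | some v => result ++ [v]
    | none => result) []

-- ===== PORT B =====
-- first even element of a list, stopping at the first hit (the inner reversed-loop with break)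
def pvFirstEven : List Int → Option Int
  | [] => none
  | e :: rest => if PySem.Int.mod e 2 == 0 then some e else pvFirstEven rest

def get_last_even_elements_alt (matrix : List (List Int)) : List Int :=
  matrix.foldl (fun result row =>
    match pvFirstEven row.reverse with
    | some v => result ++ [v]
    | none => result) []

-- ===== PRECONDITION & SPEC =====
def Spec_get_last_even_elements (matrix : List (List Int)) (out : List Int) : Prop := out = get_last_even_elements_alt matrix
instance (matrix : List (List Int)) (out : List Int) : Decidable (Spec_get_last_even_elements matrix out) := by unfold Spec_get_last_even_elements; infer_instance

-- ===== CLAIM (what is proved, stated in full; the proofs are below) =====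
def Claim_equal_get_last_even_elements : Prop := ∀ (matrix : List (List Int)), Dom_get_last_even_elements matrix → Spec_get_last_even_elements matrix (get_last_even_elements matrix)

-- ===== LEMMAS AND PROOFS =====

-- the forward last-even fold equals the first even of the reversed row
theorem pv_fold_eq_firstEven (row : List Int) (acc : Option Int) :
    row.foldl (fun acc element =>
        if PySem.Int.mod element 2 == 0 then some element else acc) acc
      = match pvFirstEven row.reverse with
        | some v => some v
        | none => acc := by
  induction row using List.reverseRecOn generalizing acc with
  | nil => simp [pvFirstEven]
  | append_singleton l e ih =>
      simp only [List.foldl_append, List.foldl_cons, List.foldl_nil,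
        List.reverse_append, List.reverse_cons, List.reverse_nil,
        List.nil_append, List.cons_append, pvFirstEven]
      split_ifs with h
      · rfl
      · exact ih acc

theorem get_last_even_elements_spec : Claim_equal_get_last_even_elements := by
  intro matrix _
  unfold Spec_get_last_even_elements get_last_even_elements get_last_even_elements_alt
  congr 1
  funext result row
  simp only [pv_fold_eq_firstEven]
  cases pvFirstEven row.reverse <;> rfl
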